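-- pv_equiv track=rewrite | github.com/LeeKhanhs/CS112 | CS112/bruteforce/D.py | serve
-- ===== SOURCE A (Python) =====
-- def serve(machine, items):
--     total_time = 0
--     for item in items:
--         i = -1
--         while machine[i] != item:
--             i -= 1
--         total_time -= i
--         machine.append(machine.pop(len(machine) + i))
--     return total_time
-- ===== SOURCE B (Python) =====
-- def serve(machine, items):
--     # Timestamp view: each element carries a unique, strictly increasing timestamp;
--     # the machine's order is the ascending order of timestamps.  Serving an item
--     # costs 1 + (number of elements with a larger timestamp), and re-stamps it
--     # with a fresh maximal timestamp.  (Does not mutate `machine`, unlike A.)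
--     by_time = {}
--     for t, v in enumerate(machine):
--         by_time[t] = v
--     now = len(machine)
--     total = 0
--     for item in items:
--         t = max(u for u, v in by_time.items() if v == item)
--         total += 1 + sum(1 for u in by_time if u > t)
--         del by_time[t]
--         by_time[now] = item
--         now += 1
--     return total
-- ===== Notes on version B (the rewrite author's own statement) =====
-- stated objective: alternative
-- what changed: A simulates the shelf as a mutable list (backward negative-index scan, pop and re-append); B replaces the list simulation by a timestamp dictionary: each element carries a unique increasing timestamp, the access cost is 1 + the count of larger live timestamps, and serving re-stamps the item with a fresh maximal timestamp; B does not mutate the machine argument (A does), so equivalence is about the return value.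
import Mathlib
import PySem

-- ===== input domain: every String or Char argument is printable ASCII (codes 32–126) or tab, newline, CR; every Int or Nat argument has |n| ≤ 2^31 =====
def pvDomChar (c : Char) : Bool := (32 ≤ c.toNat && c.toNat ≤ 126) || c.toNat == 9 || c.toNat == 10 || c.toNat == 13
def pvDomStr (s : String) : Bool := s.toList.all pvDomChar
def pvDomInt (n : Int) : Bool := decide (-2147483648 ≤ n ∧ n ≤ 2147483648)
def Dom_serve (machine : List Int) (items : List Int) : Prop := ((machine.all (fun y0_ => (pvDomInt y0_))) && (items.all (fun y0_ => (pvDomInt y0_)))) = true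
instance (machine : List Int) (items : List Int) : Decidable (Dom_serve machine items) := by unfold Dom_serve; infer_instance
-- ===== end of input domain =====

-- B replaces A's list simulation (backward negative-index scan + pop/append, which
-- mutates `machine` in place) by a timestamp dictionary; B does not mutate `machine`,
-- so the equivalence proved here is about the RETURN value only (objective: alternative).

-- ===== PORT A =====
-- the 'while machine[i] != item: i -= 1' loop; fuel bounds the probes, none = IndexError
def serveScan (machine : List Int) (item : Int) : Int → Nat → Option Int
  | _, 0 => none
  | i, fuel+1 =>
    match PySem.List.pyGet? machine i with
    | none => none
    | some v => if v = item then some i else serveScan machine item (i-1) fuel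

def serveLoop : List Int → Int → List Int → Option Int
  | _, total, [] => some total
  | machine, total, item :: rest =>
    match serveScan machine item (-1) (machine.length + 1) with
    | none => none
    | some i =>
      match PySem.List.pop? machine (PySem.List.len machine + i) with
      | none => none
      | some (x, m') => serveLoop (m' ++ [x]) (total - i) rest

def serve (machine : List Int) (items : List Int) : Int :=
  (serveLoop machine 0 items).getD 0

-- ===== PORT B =====
def altLoop : PySem.Dict Int Int → Int → Int → List Int → Option Int
  | _, _, total, [] => some total
  | d, now, total, item :: rest =>
    -- t = max(u for u, v in by_time.items() if v == item)   (none = ValueError)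
    match PySem.List.max? ((d.items.filter (fun p => p.2 == item)).map Prod.fst) (fun u => u) with
    | none => none
    | some t =>
        altLoop ((d.erase t).insert now item) (now + 1)
          (total + 1 + ((d.keys.filter (fun u => decide (t < u))).length : Int)) rest

def serve_alt (machine : List Int) (items : List Int) : Int :=
  (altLoop ((PySem.List.enumerate machine 0).foldl (fun d p => d.insert p.1 p.2) PySem.Dict.empty)
    (PySem.List.len machine) 0 items).getD 0

-- ===== PRECONDITION & SPEC =====
-- Pre_ excludes items absent from machine: there A raises IndexError (and B ValueError).
def Pre_serve (machine : List Int) (items : List Int) : Prop := ∀ x ∈ items, x ∈ machine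
instance (machine : List Int) (items : List Int) : Decidable (Pre_serve machine items) := by
  unfold Pre_serve; infer_instance

def pvWitness_serve : List Int × List Int := ([1, 2, 3], [2, 2, 1])

def Spec_serve (machine : List Int) (items : List Int) (out : Int) : Prop := out = serve_alt machine items
instance (machine : List Int) (items : List Int) (out : Int) : Decidable (Spec_serve machine items out) := by
  unfold Spec_serve; infer_instance

-- ===== CLAIM (what is proved, stated in full; the proofs are below) =====
def Claim_equal_serve : Prop := ∀ (machine : List Int) (items : List Int), Dom_serve machine items → Pre_serve machine items → Spec_serve machine items (serve machine items)

-- ===== LEMMAS AND PROOFS =====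

-- last-occurrence decomposition of a list
lemma last_split {item : Int} : ∀ {l : List Int}, item ∈ l →
    ∃ u w, l = u ++ item :: w ∧ item ∉ w := by
  intro l h
  induction l with
  | nil => cases h
  | cons a l ih =>
    by_cases hm : item ∈ l
    · obtain ⟨u, w, rfl, hw⟩ := ih hm
      exact ⟨a :: u, w, rfl, hw⟩
    · rcases List.mem_cons.mp h with rfl | hl
      · exact ⟨[], l, rfl, hm⟩
      · exact absurd hl hm

-- the backward scan finds the first match counted from the back
lemma scan_spec : ∀ (fuel : Nat) (machine : List Int) (item : Int) (k : Nat) (pre suf : List Int),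
    1 ≤ k → machine.reverse.drop (k-1) = pre ++ item :: suf → item ∉ pre →
    pre.length + 1 ≤ fuel →
    serveScan machine item (-(k : Int)) fuel = some (-(k : Int) - pre.length) := by
  intro fuel
  induction fuel with
  | zero => intro _ _ _ pre _ _ _ _ hfuel; omega
  | succ f ih =>
    intro machine item k pre suf hk hdrop hpre hfuel
    have hne : machine.reverse.drop (k-1) ≠ [] := by simp [hdrop]
    have hlenr : k - 1 < machine.reverse.length := List.length_lt_of_drop_ne_nil hne
    have hlen : k ≤ machine.length := by simp at hlenr; omega
    have h0 : machine.reverse[(k-1) + 0]? = (machine.reverse.drop (k-1))[0]? :=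
      (List.getElem?_drop).symm
    rw [hdrop] at h0
    have hget : PySem.List.pyGet? machine (-(k : Int)) = (pre ++ item :: suf)[0]? := by
      rw [PySem.List.pyGet?_neg_natCast machine k (by omega) hlen]
      simp only [Nat.add_zero] at h0
      have hix : machine.length - k = machine.length - 1 - (k-1) := by omega
      rw [hix, ← List.getElem?_reverse (by omega), h0]
    cases pre with
    | nil =>
      simp only [List.nil_append, List.getElem?_cons_zero] at hget
      simp [serveScan, hget]
    | cons p pre' =>
      simp only [List.cons_append, List.getElem?_cons_zero] at hget
      have hpne : p ≠ item := by simp at hpre; tauto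
      have hdrop' : machine.reverse.drop ((k+1)-1) = pre' ++ item :: suf := by
        have h1 : machine.reverse.drop k = (machine.reverse.drop (k-1)).drop 1 := by
          rw [List.drop_drop]; congr 1; omega
        simpa [hdrop] using h1
      have hrec := ih machine item (k+1) pre' suf (by omega) hdrop'
        (by simp at hpre; tauto) (by simp at hfuel ⊢; omega)
      have hidx : -(k : Int) - 1 = -((k+1 : Nat) : Int) := by push_cast; ring
      simp only [serveScan, hget, hpne, if_false]
      rw [hidx, hrec]
      congr 1
      push_cast [List.length_cons]
      ring

lemma max_of_append_singleton (ys : List Int) (m : Int) (h : ∀ y ∈ ys, y < m) :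
    PySem.List.max? (ys ++ [m]) (fun u => u) = some m := by
  cases ys with
  | nil => simp [PySem.List.max?_id_cons]
  | cons y ys' =>
    rw [List.cons_append, PySem.List.max?_id_cons]
    have h1 := PySem.List.le_foldl_max (ys' ++ [m]) y
    have h2 := PySem.List.foldl_max_mem (ys' ++ [m]) y
    have hm : m ≤ (ys' ++ [m]).foldl max y := h1.2 m (by simp)
    congr 1
    rcases h2 with h2 | h2
    · exfalso; have := h y (by simp); omega
    · rcases List.mem_append.mp h2 with h2 | h2
      · exfalso; have := h _ (List.mem_cons_of_mem _ h2); omega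
      · simpa using h2

lemma eraseIdx_append_cons (u : List Int) (x : Int) (w : List Int) :
    (u ++ x :: w).eraseIdx u.length = u ++ w := by
  induction u with
  | nil => rfl
  | cons a u ih => simpa [List.eraseIdx] using ih

lemma items_erase (d : PySem.Dict Int Int) (k : Int) :
    (d.erase k).items = d.items.filter (fun p => !(p.1 == k)) := by
  simp [PySem.Dict.erase]

lemma loop_eq : ∀ (items machine : List Int) (L : List (Int × Int)) (d : PySem.Dict Int Int)
    (now total : Int),
    d.items = L →
    L.map Prod.snd = machine →
    (L.map Prod.fst).Pairwise (· < ·) →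
    (∀ k ∈ L.map Prod.fst, k < now) →
    (∀ x ∈ items, x ∈ machine) →
    serveLoop machine total items = altLoop d now total items := by
  intro items
  induction items with
  | nil => intro machine L d now total _ _ _ _ _; rfl
  | cons item rest ih =>
    intro machine L d now total hdL hval hpair hlt hmem
    obtain ⟨u, w, hm, hw⟩ := last_split (hmem item (List.mem_cons_self))
    subst hm
    obtain ⟨Lu, L2, hL, hLu, hL2⟩ := List.append_eq_map_iff.mp hval.symm
    obtain ⟨e, Lw, hL2', he, hLw⟩ := List.map_eq_cons_iff.mp hL2
    subst hL2'
    subst hL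
    obtain ⟨t, e2⟩ := e
    have he' : item = e2 := he.symm
    subst he'
    -- key facts from the strictly increasing key list
    rw [List.map_append, List.map_cons] at hpair hlt
    obtain ⟨hpu, hptw, hcross⟩ := List.pairwise_append.mp hpair
    obtain ⟨hKw, hpw⟩ := List.pairwise_cons.mp hptw
    have hKu : ∀ a ∈ Lu.map Prod.fst, a < t := fun a ha => hcross a ha t (List.mem_cons_self)
    -- ===== A side =====
    have hscan := scan_spec ((u ++ item :: w).length + 1) (u ++ item :: w) item 1
      w.reverse u.reverse (le_refl 1) (by simp) (by simpa using hw)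
      (by simp; omega)
    simp only [List.length_reverse, Nat.cast_one] at hscan
    have hidx : PySem.List.len (u ++ item :: w) + (-1 - (w.length : Int)) = ((u.length : Nat) : Int) := by
      simp [PySem.List.len_eq]
      ring
    have hpop : PySem.List.pop? (u ++ item :: w) ((u.length : Nat) : Int) = some (item, u ++ w) := by
      rw [PySem.List.pop?_natCast (u ++ item :: w) u.length (by simp)]
      simp [eraseIdx_append_cons]
    -- ===== B side =====
    have hLwf : Lw.filter (fun p => p.2 == item) = [] := by
      apply List.filter_eq_nil_iff.mpr
      intro p hp
      have hp2 : p.2 ∈ Lw.map Prod.snd := List.mem_map_of_mem hp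
      rw [hLw] at hp2
      simp only [ne_eq, beq_iff_eq]
      intro heq
      exact hw (heq ▸ hp2)
    have hF : (((Lu ++ (t, item) :: Lw).filter (fun p => p.2 == item)).map Prod.fst)
        = (Lu.filter (fun p => p.2 == item)).map Prod.fst ++ [t] := by
      simp [List.filter_append, hLwf]
    have hmax : PySem.List.max? (((Lu ++ (t, item) :: Lw).filter (fun p => p.2 == item)).map Prod.fst)
        (fun u => u) = some t := by
      rw [hF]
      apply max_of_append_singleton
      intro y hy
      obtain ⟨p, hp, rfl⟩ := List.mem_map.mp hy
      exact hKu p.1 (List.mem_map_of_mem (List.mem_of_mem_filter hp))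
    have hkeys : d.keys = (Lu ++ (t, item) :: Lw).map Prod.fst := by
      simp [PySem.Dict.keys, hdL]
    have hcnt : d.keys.filter (fun v => decide (t < v)) = Lw.map Prod.fst := by
      rw [hkeys, List.map_append, List.map_cons, List.filter_append, List.filter_cons]
      have h1 : (Lu.map Prod.fst).filter (fun v => decide (t < v)) = [] := by
        apply List.filter_eq_nil_iff.mpr
        intro a ha
        simpa using not_lt.mpr (le_of_lt (hKu a ha))
      have h2 : (Lw.map Prod.fst).filter (fun v => decide (t < v)) = Lw.map Prod.fst := by
        apply List.filter_eq_self.mpr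
        intro b hb
        simpa using hKw b hb
      simp [h1, h2]
    have herase : (d.erase t).items = Lu ++ Lw := by
      rw [items_erase, hdL, List.filter_append, List.filter_cons]
      have h1 : Lu.filter (fun p => !(p.1 == t)) = Lu := by
        apply List.filter_eq_self.mpr
        intro p hp
        have := hKu p.1 (List.mem_map_of_mem hp)
        simp only [Bool.not_eq_eq_eq_not, Bool.not_true, beq_eq_false_iff_ne, ne_eq]
        omega
      have h2 : Lw.filter (fun p => !(p.1 == t)) = Lw := by
        apply List.filter_eq_self.mpr
        intro p hp
        have := hKw p.1 (List.mem_map_of_mem hp)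
        simp only [Bool.not_eq_eq_eq_not, Bool.not_true, beq_eq_false_iff_ne, ne_eq]
        omega
      simp [h1, h2]
    have hcont : (d.erase t).contains now = false := by
      rw [PySem.Dict.contains_eq_decide_mem_keys]
      simp only [PySem.Dict.keys]
      simp only [herase, decide_eq_false_iff_not]
      intro hmem'
      obtain ⟨p, hp, hp1⟩ := List.mem_map.mp hmem'
      have hlt' : p.1 < now := by
        rcases List.mem_append.mp hp with h | h
        · exact hlt p.1 (List.mem_append.mpr (Or.inl (List.mem_map_of_mem h)))
        · exact hlt p.1 (List.mem_append.mpr (Or.inr (List.mem_cons_of_mem _ (List.mem_map_of_mem h))))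
      omega
    have hins : ((d.erase t).insert now item).items = (Lu ++ Lw) ++ [(now, item)] := by
      rw [PySem.Dict.items_insert_of_not_contains _ _ hcont, herase]
    -- totals agree
    have hlw : Lw.length = w.length := by rw [← hLw]; simp
    have htot : total - (-1 - (w.length : Int)) = total + 1 + ((Lw.map Prod.fst).length : Int) := by
      simp [hlw]
      ring
    -- unfold one step of each loop
    rw [show serveLoop (u ++ item :: w) total (item :: rest)
          = serveLoop ((u ++ w) ++ [item]) (total - (-1 - (w.length : Int))) rest by
        simp only [serveLoop, hscan, hidx, hpop]]
    rw [show altLoop d now total (item :: rest)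
          = altLoop ((d.erase t).insert now item) (now + 1)
              (total + 1 + ((Lw.map Prod.fst).length : Int)) rest by
        simp only [altLoop, hdL, hmax, hcnt]]
    rw [htot]
    apply ih ((u ++ w) ++ [item]) ((Lu ++ Lw) ++ [(now, item)]) _ (now + 1) _ hins
    · simp [hLu, hLw]
    · rw [List.map_append, List.map_append]
      apply List.pairwise_append.mpr
      refine ⟨List.pairwise_append.mpr ⟨hpu, hpw, ?_⟩, List.pairwise_singleton _ _, ?_⟩
      · intro a ha b hb
        exact lt_trans (hKu a ha) (hKw b hb)
      · intro a ha b hb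
        simp only [List.map_cons, List.map_nil, List.mem_singleton] at hb
        subst hb
        rcases List.mem_append.mp ha with h | h
        · exact hlt a (List.mem_append.mpr (Or.inl h))
        · exact hlt a (List.mem_append.mpr (Or.inr (List.mem_cons_of_mem _ h)))
    · intro k hk
      rw [List.map_append, List.map_append] at hk
      rcases List.mem_append.mp hk with h | h
      · have : k < now := by
          rcases List.mem_append.mp h with h' | h'
          · exact hlt k (List.mem_append.mpr (Or.inl h'))
          · exact hlt k (List.mem_append.mpr (Or.inr (List.mem_cons_of_mem _ h')))
        omega
      · simp only [List.map_cons, List.map_nil, List.mem_singleton] at h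
        omega
    · intro x hx
      have := hmem x (List.mem_cons_of_mem _ hx)
      simp only [List.mem_append, List.mem_cons] at this ⊢
      tauto

-- ===== VERDICT (by name: the statement is the Claim_ definition above) =====
theorem serve_spec : Claim_equal_serve := by
  intro machine items _ hpre
  unfold Spec_serve serve serve_alt
  congr 1
  have hfst : List.map Prod.fst (PySem.List.enumerate machine 0)
      = PySem.List.pyRange 0 (0 + (machine.length : Int)) 1 :=
    PySem.List.map_fst_enumerate machine 0
  have hd : ((PySem.List.enumerate machine 0).foldl (fun d p => d.insert p.1 p.2)
      (PySem.Dict.empty : PySem.Dict Int Int)).items = PySem.List.enumerate machine 0 := by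
    rw [PySem.Dict.items_foldl_insert_fresh (PySem.List.enumerate machine 0) Prod.fst Prod.snd
      PySem.Dict.empty (fun a _ => PySem.Dict.contains_empty a.1)
      (by rw [hfst]; exact PySem.List.nodup_pyRange_one _ _)]
    show ([] : List (Int × Int)) ++ _ = _
    simp
  apply loop_eq items machine (PySem.List.enumerate machine 0) _ (PySem.List.len machine) 0 hd ?_ ?_ ?_ hpre
  · exact PySem.List.map_snd_enumerate machine 0
  · rw [hfst]
    exact PySem.List.pairwise_lt_pyRange_one _ _
  · intro k hk
    rw [hfst] at hk
    have := (PySem.List.mem_pyRange_one.mp hk).2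
    rw [PySem.List.len_eq]
    omega
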